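-- pv_equiv track=rewrite | github.com/tzorca/race-result-normalizer | race_result_parser.py | map_list_to_csv
-- ===== SOURCE A (Python) =====
-- def map_list_to_csv(map_list, separator):
--     column_indexes = {}
--     out_buffer = []
--
--     # Assign each key to a unique column index
--     for dictionary in map_list:
--         for key in dictionary:
--             if (key not in column_indexes):
--                 column_indexes[key] = len(column_indexes)
--
--     # Add header to output buffer
--     header = [""] * len(column_indexes)
--     for index, key in enumerate(column_indexes):
--         header[index] = key
--     out_buffer.append(separator.join(header))
--     out_buffer.append("\n")
--
--     # Add data to output buffer
--     for dictionary in map_list: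
--         line = [""] * len(column_indexes)
--
--         for key in dictionary:
--             index = column_indexes[key]
--
--             line[index] = dictionary[key]
--
--         out_buffer.append(separator.join(line))
--         out_buffer.append("\n")
--
--     return ''.join(out_buffer)
-- ===== SOURCE B (Python) =====
-- def map_list_to_csv(map_list, separator):
--     # gather: compute the ordered column list once, then pull each row's
--     # values out by column (A scatters values into preallocated slots via a
--     # key->index dictionary).
--     columns = list(dict.fromkeys(key for dictionary in map_list for key in dictionary))
--     lines = [separator.join(columns)]
--     lines.extend(separator.join(dictionary.get(key, "") for key in columns)
--                  for dictionary in map_list)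
--     return "".join(line + "\n" for line in lines)
-- ===== Notes on version B (the rewrite author's own statement) =====
-- stated objective: simpler
-- what changed: Drops the key->index dictionary and the scatter-into-preallocated-slots writes: B computes the first-appearance column list once and builds every line by gathering dictionary.get(key, '') per column.
import Mathlib
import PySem

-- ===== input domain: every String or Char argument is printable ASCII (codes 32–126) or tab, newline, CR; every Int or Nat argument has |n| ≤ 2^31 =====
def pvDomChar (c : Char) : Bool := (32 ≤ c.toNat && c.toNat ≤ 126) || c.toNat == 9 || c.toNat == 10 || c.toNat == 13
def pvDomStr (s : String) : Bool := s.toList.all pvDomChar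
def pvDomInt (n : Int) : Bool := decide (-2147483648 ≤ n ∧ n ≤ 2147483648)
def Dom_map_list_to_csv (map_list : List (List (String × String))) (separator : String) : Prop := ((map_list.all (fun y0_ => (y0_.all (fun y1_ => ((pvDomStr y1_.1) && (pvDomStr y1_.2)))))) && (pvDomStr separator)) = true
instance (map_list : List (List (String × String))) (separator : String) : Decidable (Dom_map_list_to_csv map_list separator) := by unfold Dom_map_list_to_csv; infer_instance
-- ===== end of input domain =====

-- B replaces A's key->index dictionary and scatter-into-slots writes by a gather
-- over the first-appearance column list (simpler; return value only, no mutation).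

-- ===== PORT A =====
-- inner lists model Python dicts: PySem.Dict.ofList gives dict semantics (first
-- key position, last value wins); enumerate indices are ≥ 0, so .toNat is exact.
def map_list_to_csv (map_list : List (List (String × String))) (separator : String) : String :=
  let column_indexes : PySem.Dict String Nat :=
    map_list.foldl (fun ci dictionary =>
      (PySem.Dict.ofList dictionary).keys.foldl (fun ci key =>
        if ci.contains key then ci else ci.insert key ci.size) ci)
      PySem.Dict.empty
  let header : List String :=
    (PySem.List.enumerate column_indexes.keys).foldl
      (fun h p => h.set p.1.toNat p.2)
      (List.replicate column_indexes.size "")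
  let out_buffer : List String := [PySem.Str.join separator header, "\n"]
  let out_buffer := map_list.foldl (fun out dictionary =>
      let d := PySem.Dict.ofList dictionary
      let line := d.items.foldl
        (fun line p => line.set (column_indexes.getD p.1 0) p.2)
        (List.replicate column_indexes.size "")
      out ++ [PySem.Str.join separator line, "\n"]) out_buffer
  PySem.Str.join "" out_buffer

-- ===== PORT B =====
def map_list_to_csv_alt (map_list : List (List (String × String))) (separator : String) : String :=
  let columns : List String :=
    PySem.List.dedup (map_list.flatMap (fun dictionary => (PySem.Dict.ofList dictionary).keys))
  let lines : List String :=
    PySem.Str.join separator columns ::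
      map_list.map (fun dictionary =>
        PySem.Str.join separator (columns.map (fun key => (PySem.Dict.ofList dictionary).getD key "")))
  PySem.Str.join "" (lines.map (fun line => line ++ "\n"))

-- ===== PRECONDITION & SPEC =====
def Spec_map_list_to_csv (map_list : List (List (String × String))) (separator : String) (out : String) : Prop := out = map_list_to_csv_alt map_list separator
instance (map_list : List (List (String × String))) (separator : String) (out : String) : Decidable (Spec_map_list_to_csv map_list separator out) := by unfold Spec_map_list_to_csv; infer_instance

-- ===== CLAIM (what is proved, stated in full; the proofs are below) =====
def Claim_equal_map_list_to_csv : Prop := ∀ (map_list : List (List (String × String))) (separator : String), Dom_map_list_to_csv map_list separator → Spec_map_list_to_csv map_list separator (map_list_to_csv map_list separator)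

-- ===== LEMMAS AND PROOFS =====

/-- A's `column_indexes` after processing columns `cols` in order. -/
def idxDict (cols : List String) : PySem.Dict String Nat := PySem.Dict.mk (cols.zipIdx)

theorem find?_congr' {α : Type} (l : List α) (p q : α → Bool)
    (h : ∀ x ∈ l, p x = q x) : l.find? p = l.find? q := by
  induction l with
  | nil => rfl
  | cons a t ih =>
    simp only [List.find?_cons, h a (by simp)]
    cases q a <;> simp [ih (fun x hx => h x (by simp [hx]))]

theorem any_fst_zipIdx (cols : List String) (k : String) (n : Nat) :
    ((cols.zipIdx n).any (fun p => p.1 == k)) = cols.contains k := by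
  induction cols generalizing n with
  | nil => rfl
  | cons a t ih =>
    simp only [List.zipIdx_cons, List.any_cons, ih]
    by_cases h : k = a
    · simp [h]
    · simp [h]
      intro hh
      exact absurd hh.symm h

theorem contains_idxDict (cols : List String) (k : String) :
    (idxDict cols).contains k = cols.contains k := by
  exact any_fst_zipIdx cols k 0

theorem size_idxDict (cols : List String) : (idxDict cols).size = cols.length := by
  simp [idxDict, PySem.Dict.size]

theorem idxDict_step (cols : List String) (k : String) :
    (if (idxDict cols).contains k then idxDict cols
     else (idxDict cols).insert k (idxDict cols).size) = idxDict (PySem.Set.add cols k) := by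
  rw [contains_idxDict, PySem.Set.add, PySem.Set.contains]
  by_cases hc : cols.contains k
  · have hm : k ∈ cols := by simpa using hc
    simp [hm]
  · have hc' : cols.contains k = false := by simpa using hc
    have hm : k ∉ cols := by simpa using hc
    have hins := PySem.Dict.items_insert_of_not_contains (idxDict cols)
      ((idxDict cols).size) (by rw [contains_idxDict]; exact hc')
    rw [hc']
    simp only [Bool.false_eq_true, if_false]
    apply PySem.Dict.ext
    rw [hins]
    simp [idxDict, PySem.Dict.size, List.zipIdx_append]

theorem idxDict_foldKeys (ks cols : List String) :
    ks.foldl (fun ci key => if ci.contains key then ci else ci.insert key ci.size) (idxDict cols)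
      = idxDict (ks.foldl PySem.Set.add cols) := by
  induction ks generalizing cols with
  | nil => rfl
  | cons a t ih => simp only [List.foldl_cons, idxDict_step, ih]

theorem idxDict_fold (map_list : List (List (String × String))) (cols : List String) :
    map_list.foldl (fun ci dictionary =>
        (PySem.Dict.ofList dictionary).keys.foldl (fun ci key =>
          if ci.contains key then ci else ci.insert key ci.size) ci) (idxDict cols)
      = idxDict (map_list.foldl (fun cs d => (PySem.Dict.ofList d).keys.foldl PySem.Set.add cs) cols) := by
  induction map_list generalizing cols with
  | nil => rfl
  | cons d t ih => simp only [List.foldl_cons, idxDict_foldKeys, ih]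

theorem columns_eq (map_list : List (List (String × String))) :
    PySem.List.dedup (map_list.flatMap (fun d => (PySem.Dict.ofList d).keys))
      = map_list.foldl (fun cs d => (PySem.Dict.ofList d).keys.foldl PySem.Set.add cs) [] := by
  rw [PySem.List.dedup, PySem.Set.ofList, List.flatMap_def, List.foldl_flatten, List.foldl_map]
  rfl

/-- length through a scatter loop -/
theorem foldl_set_length {α β : Type} (ps : List α) (pos : α → Nat) (val : α → β) (base : List β) :
    (ps.foldl (fun h x => h.set (pos x) (val x)) base).length = base.length := by
  induction ps generalizing base with
  | nil => rfl
  | cons a t ih => simp [ih]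

theorem foldl_set_get?_none {α β : Type} (ps : List α) (pos : α → Nat) (val : α → β)
    (base : List β) (j : Nat) (h : ∀ x ∈ ps, pos x ≠ j) :
    (ps.foldl (fun h x => h.set (pos x) (val x)) base)[j]? = base[j]? := by
  induction ps generalizing base with
  | nil => rfl
  | cons a t ih =>
    rw [List.foldl_cons, ih _ (fun x hx => h x (by simp [hx])),
      List.getElem?_set_ne (h a (by simp))]

theorem foldl_set_get? {α β : Type} (ps : List α) (pos : α → Nat) (val : α → β)
    (base : List β) (j : Nat) (hnd : (ps.map pos).Nodup) (hj : j < base.length) :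
    (ps.foldl (fun h x => h.set (pos x) (val x)) base)[j]?
      = match ps.find? (fun x => pos x == j) with
        | some x => some (val x)
        | none => base[j]? := by
  induction ps generalizing base with
  | nil => rfl
  | cons a t ih =>
    simp only [List.map_cons, List.nodup_cons] at hnd
    rw [List.foldl_cons, List.find?_cons]
    by_cases hpa : pos a = j
    · have hnone : ∀ x ∈ t, pos x ≠ j := by
        intro x hx hc
        exact hnd.1 ((hpa.trans hc.symm) ▸ List.mem_map_of_mem hx)
      rw [foldl_set_get?_none t pos val _ j hnone]
      simp [hpa, hj]
    · have hne : (pos a == j) = false := by simp [hpa]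
      rw [ih _ hnd.2 (by simpa using hj)]
      cases List.find? (fun x => pos x == j) t <;>
        simp [hne, List.getElem?_set_ne hpa]

theorem get?_ofList_def (d : List (String × String)) (k : String) :
    (PySem.Dict.ofList d).get? k
      = ((PySem.Dict.ofList d).items.find? (fun p => p.1 == k)).map (fun p => p.2) := rfl

theorem idxDict_get?_some_spec (cols : List String) (k : String) (j : Nat)
    (h : (idxDict cols).get? k = some j) : ∃ hj : j < cols.length, cols[j] = k := by
  have hget : (idxDict cols).get? k
      = ((cols.zipIdx).find? (fun p => p.1 == k)).map Prod.snd := rfl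
  rw [hget] at h
  cases hf : (cols.zipIdx).find? (fun p => p.1 == k) with
  | none => simp [hf] at h
  | some p =>
    rw [hf] at h
    simp only [Option.map_some, Option.some.injEq] at h
    have hm := List.mem_of_find?_eq_some hf
    have hp : p.1 = k := by simpa using List.find?_some hf
    obtain ⟨-, hlt, he⟩ := List.mem_zipIdx (x := p.1) (i := p.2) (by simpa using hm)
    subst h
    subst hp
    exact ⟨by omega, by simpa using he.symm⟩

/-- `get?` of `idxDict cols` determines the position in `cols`. -/
theorem idxDict_get?_eq_some (cols : List String) (hnd : cols.Nodup) (k : String) (j : Nat)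
    (hj : j < cols.length) :
    ((idxDict cols).get? k = some j) ↔ cols[j] = k := by
  have hget : (idxDict cols).get? k
      = ((cols.zipIdx).find? (fun p => p.1 == k)).map Prod.snd := rfl
  constructor
  · intro h
    rw [hget] at h
    cases hf : (cols.zipIdx).find? (fun p => p.1 == k) with
    | none => simp [hf] at h
    | some p =>
      rw [hf] at h
      simp only [Option.map_some, Option.some.injEq] at h
      have hm := List.mem_of_find?_eq_some hf
      have hp : p.1 = k := by simpa using List.find?_some hf
      obtain ⟨-, hlt, he⟩ := List.mem_zipIdx (x := p.1) (i := p.2) (by simpa using hm)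
      subst h
      subst hp
      simpa using he.symm
  · intro h
    have hjz : j < cols.length := hj
    have hmem : (cols[j], j) ∈ cols.zipIdx := by
      rw [List.mem_iff_getElem]
      exact ⟨j, by simpa using hjz, by simp [List.getElem_zipIdx]⟩
    have hsome : ((cols.zipIdx).find? (fun p => p.1 == k)).isSome := by
      rw [List.find?_isSome]
      exact ⟨(cols[j], j), hmem, by simp [h]⟩
    obtain ⟨p, hf⟩ := Option.isSome_iff_exists.mp hsome
    have hp : p.1 = k := by simpa using List.find?_some hf
    have hm := List.mem_of_find?_eq_some hf
    obtain ⟨-, hlt, he⟩ := List.mem_zipIdx (x := p.1) (i := p.2) (by simpa using hm)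
    have : p.2 = j := by
      apply (hnd.getElem_inj_iff (hi := by simpa using hlt) (hj := hjz)).mp
      have he' : p.1 = cols[p.2]'(by omega) := by simpa using he
      exact he'.symm.trans (hp.trans h.symm)
    rw [hget, hf]
    simp [this]

theorem idxDict_get?_isSome (cols : List String) (k : String) (hk : k ∈ cols) :
    ((idxDict cols).get? k).isSome := by
  have hget : (idxDict cols).get? k
      = ((cols.zipIdx).find? (fun p => p.1 == k)).map Prod.snd := rfl
  rw [hget, Option.isSome_map]
  rw [List.find?_isSome]
  obtain ⟨j, hj, he⟩ := List.mem_iff_getElem.mp hk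
  refine ⟨(cols[j], j), ?_, by simp [he]⟩
  rw [List.mem_iff_getElem]
  exact ⟨j, by simpa using hj, by simp [List.getElem_zipIdx]⟩

-- header scatter: writing key i at slot i reproduces cols
theorem header_eq (cols : List String) :
    (PySem.List.enumerate cols).foldl (fun h p => h.set p.1.toNat p.2)
        (List.replicate cols.length "") = cols := by
  have henum : ∀ (l : List String) (n : Nat),
      PySem.List.enumerate l (n : Int) = (l.zipIdx n).map (fun p => ((p.2 : Int), p.1)) := by
    intro l
    induction l with
    | nil => intro n; rfl
    | cons a t ih =>
      intro n
      show ((n : Int), a) :: PySem.List.enumerate t ((n : Int) + 1)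
        = _
      rw [show ((n : Int) + 1) = ((n + 1 : Nat) : Int) by push_cast; ring, ih]
      simp [List.zipIdx_cons]
  have h0 : (0 : Int) = ((0 : Nat) : Int) := rfl
  rw [show PySem.List.enumerate cols = PySem.List.enumerate cols ((0 : Nat) : Int) from rfl,
    henum, List.foldl_map]
  have hfind : ∀ (l : List String) (n j : Nat) (hj : j < l.length),
      (l.zipIdx n).find? (fun p => p.2 == n + j) = some (l[j]'hj, n + j) := by
    intro l
    induction l with
    | nil => intro n j hj; simp at hj
    | cons a t ih =>
      intro n j hj
      cases j with
      | zero => simp [List.zipIdx_cons]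
      | succ j' =>
        rw [List.zipIdx_cons, List.find?_cons]
        have hne : (n == n + (j' + 1)) = false := by simp
        rw [hne]
        have := ih (n + 1) j' (by simpa using hj)
        rw [show n + 1 + j' = n + (j' + 1) by omega] at this
        simpa using this
  apply List.ext_getElem?
  intro j
  by_cases hj : j < cols.length
  · have := foldl_set_get? (cols.zipIdx 0) (fun p => (p.2 : Int).toNat) Prod.fst
      (List.replicate cols.length "") j
      (by
        have : (cols.zipIdx 0).map (fun p => ((p.2 : Int)).toNat)
            = (cols.zipIdx 0).map Prod.snd := by
          apply List.map_congr_left; intro p _; simp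
        rw [this, List.zipIdx_map_snd]
        exact List.nodup_range' 1)
      (by simpa using hj)
    rw [this]
    have hf := hfind cols 0 j hj
    simp only [Nat.zero_add] at hf
    have : ((cols.zipIdx 0).find? fun p => ((p.2 : Int)).toNat == j)
        = (cols.zipIdx 0).find? fun p => p.2 == j := by
      apply find?_congr'
      intro p _; simp
    rw [this, hf]
    simp [hj]
  · rw [List.getElem?_eq_none, List.getElem?_eq_none (by omega)]
    rw [foldl_set_length]
    simp; omega

-- row scatter = gather
theorem row_eq (cols : List String) (hnd : cols.Nodup) (d : List (String × String))
    (hsub : ∀ k ∈ (PySem.Dict.ofList d).keys, k ∈ cols) :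
    (PySem.Dict.ofList d).items.foldl
        (fun line p => line.set ((idxDict cols).getD p.1 0) p.2)
        (List.replicate cols.length "")
      = cols.map (fun key => (PySem.Dict.ofList d).getD key "") := by
  have hkeysnd := PySem.Dict.nodup_keys_ofList d
  have hpos : ∀ k, k ∈ (PySem.Dict.ofList d).keys →
      ∃ j, ((idxDict cols).get? k = some j) ∧ ∃ hj : j < cols.length, cols[j] = k := by
    intro k hk
    obtain ⟨j, hj⟩ := Option.isSome_iff_exists.mp (idxDict_get?_isSome cols k (hsub k hk))
    exact ⟨j, hj, idxDict_get?_some_spec cols k j hj⟩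
  have hmapnd : ((PySem.Dict.ofList d).items.map
      (fun p => (idxDict cols).getD p.1 0)).Nodup := by
    have : (PySem.Dict.ofList d).items.map (fun p => (idxDict cols).getD p.1 0)
        = (PySem.Dict.ofList d).keys.map (fun k => (idxDict cols).getD k 0) := by
      simp [PySem.Dict.keys, List.map_map, Function.comp]
    rw [this]
    apply hkeysnd.map_on
    intro k1 hk1 k2 hk2 hg
    obtain ⟨j1, hj1, hlt1, he1⟩ := hpos k1 hk1
    obtain ⟨j2, hj2, hlt2, he2⟩ := hpos k2 hk2
    rw [PySem.Dict.getD, hj1, PySem.Dict.getD, hj2] at hg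
    simp only [Option.getD_some] at hg
    subst hg
    exact he1.symm.trans he2
  apply List.ext_getElem?
  intro j
  by_cases hj : j < cols.length
  · rw [foldl_set_get? _ _ _ _ j hmapnd (by simpa using hj)]
    have hcongr : (PySem.Dict.ofList d).items.find?
          (fun p => (idxDict cols).getD p.1 0 == j)
        = (PySem.Dict.ofList d).items.find? (fun p => p.1 == cols[j]) := by
      apply find?_congr'
      intro p hp
      have hkmem : p.1 ∈ (PySem.Dict.ofList d).keys := by
        simp [PySem.Dict.keys]
        exact ⟨p.2, by simpa using hp⟩
      obtain ⟨i, hi, hlt, hei⟩ := hpos p.1 hkmem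
      rw [PySem.Dict.getD, hi]
      simp only [Option.getD_some]
      by_cases hij : i = j
      · subst hij
        simp [hei.symm]
      · have hne : p.1 ≠ cols[j] := by
          intro hcontra
          have := (idxDict_get?_eq_some cols hnd p.1 j hj).mpr hcontra.symm
          rw [hi] at this
          exact hij (Option.some.injEq _ _ ▸ this)
        simp [hij, hne]
    rw [hcongr]
    have hrhs : (cols.map (fun key => (PySem.Dict.ofList d).getD key ""))[j]?
        = some ((PySem.Dict.ofList d).getD (cols[j]) "") := by
      simp [hj]
    rw [hrhs]
    rw [PySem.Dict.getD, get?_ofList_def]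
    cases hfd : (PySem.Dict.ofList d).items.find? (fun p => p.1 == cols[j]) with
    | none => simp [hj]
    | some p => simp
  · rw [List.getElem?_eq_none, List.getElem?_eq_none (by simpa using (by omega : cols.length ≤ j))]
    rw [foldl_set_length]
    simp; omega

theorem intercalate_nil_left (l : List (List Char)) : List.intercalate [] l = l.flatten := by
  induction l with
  | nil => rfl
  | cons a t ih => cases t <;> simp_all [List.intercalate, List.intersperse]

theorem join_empty_newlines (lines : List String) :
    PySem.Str.join "" (lines.flatMap (fun l => [l, "\n"]))
      = PySem.Str.join "" (lines.map (fun l => l ++ "\n")) := by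
  simp only [PySem.Str.join, PySem.Chars.join]
  rw [show ("" : String).toList = [] from rfl, intercalate_nil_left, intercalate_nil_left]
  congr 1
  induction lines with
  | nil => rfl
  | cons a t ih => simp [ih]

-- ===== VERDICT (by name: the statement is the Claim_ definition above) =====
theorem keys_idxDict (cols : List String) : (idxDict cols).keys = cols := by
  simp [idxDict, PySem.Dict.keys]

theorem map_list_to_csv_spec : Claim_equal_map_list_to_csv := by
  intro map_list separator _
  show map_list_to_csv map_list separator = map_list_to_csv_alt map_list separator
  have hndC : (PySem.List.dedup
      (map_list.flatMap fun dictionary => (PySem.Dict.ofList dictionary).keys)).Nodup :=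
    PySem.Set.nodup_ofList _
  have hsubC : ∀ d ∈ map_list, ∀ k ∈ (PySem.Dict.ofList d).keys,
      k ∈ PySem.List.dedup (map_list.flatMap fun dictionary => (PySem.Dict.ofList dictionary).keys) := by
    intro d hd k hk
    rw [PySem.List.mem_dedup, List.mem_flatMap]
    exact ⟨d, hd, hk⟩
  have hfoldci : map_list.foldl (fun ci dictionary =>
        (PySem.Dict.ofList dictionary).keys.foldl (fun ci key =>
          if ci.contains key then ci else ci.insert key ci.size) ci) PySem.Dict.empty
      = idxDict (PySem.List.dedup
          (map_list.flatMap fun dictionary => (PySem.Dict.ofList dictionary).keys)) := by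
    rw [show (PySem.Dict.empty : PySem.Dict String Nat) = idxDict [] from rfl,
      idxDict_fold, ← columns_eq]
  simp only [map_list_to_csv, map_list_to_csv_alt]
  rw [hfoldci, keys_idxDict, size_idxDict, header_eq]
  rw [PySem.List.foldl_congr_mem map_list _
    (fun out dictionary => out ++
      [PySem.Str.join separator
        ((PySem.List.dedup (map_list.flatMap fun dictionary => (PySem.Dict.ofList dictionary).keys)).map
          (fun key => (PySem.Dict.ofList dictionary).getD key "")), "\n"]) _
    (by
      intro acc d hd
      rw [row_eq _ hndC d (hsubC d hd)])]
  rw [PySem.List.foldl_append_eq_flatMap]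
  rw [← join_empty_newlines]
  simp [List.flatMap_cons, List.flatMap_map]
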